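-- pv_equiv track=rewrite | github.com/ezedeem223/medical-ecg-image-to-signal-reconstruction-pipeline | archive/provenance/scripts/generate_file_audit.py | summarize_dataset_dependencies
-- ===== SOURCE A (Python) =====
-- def compact_items(items: list[str], limit: int) -> list[str]:
--     return dedupe_preserve_order([item for item in items if item])[:limit]
--
-- def summarize_dataset_dependencies(paths: list[str], file_reads: list[str]) -> list[str]:
--     candidates = []
--     for item in paths + file_reads:
--         lowered = item.lower()
--         if (
--             "/kaggle/input" in lowered
--             or lowered.endswith((".csv", ".parquet", ".json", ".hea", ".mat", ".dat", ".wfdb"))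
--         ):
--             candidates.append(item)
--     return compact_items(candidates, limit=8)
--
-- def dedupe_preserve_order(values: list[str]) -> list[str]:
--     seen = set()
--     result = []
--     for value in values:
--         if value in seen:
--             continue
--         seen.add(value)
--         result.append(value)
--     return result
-- ===== SOURCE B (Python) =====
-- def summarize_dataset_dependencies(paths: list[str], file_reads: list[str]) -> list[str]:
--     def wanted(item: str) -> bool:
--         low = item.lower()
--         return "/kaggle/input" in low or low.endswith(
--             (".csv", ".parquet", ".json", ".hea", ".mat", ".dat", ".wfdb")
--         )
--
--     def take_unique(items: list[str], k: int) -> list[str]: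
--         # recursive nub: keep the head, delete its later duplicates by
--         # filtering the tail, count down the remaining budget k
--         if not items or k == 0:
--             return []
--         head = items[0]
--         return [head] + take_unique([x for x in items[1:] if x != head], k - 1)
--
--     return take_unique([p for p in paths + file_reads if wanted(p)], 8)
-- ===== Notes on version B (the rewrite author's own statement) =====
-- stated objective: alternative
-- what changed: Replaced the seen-set dedupe plus slice-to-8 with a recursive nub: filter the candidates once, then recursively keep the head and delete its later duplicates by filtering the tail, counting down a budget of 8 — no auxiliary set, no slicing pass; the dead empty-string filter is dropped since empty strings never match.
import Mathlib
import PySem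

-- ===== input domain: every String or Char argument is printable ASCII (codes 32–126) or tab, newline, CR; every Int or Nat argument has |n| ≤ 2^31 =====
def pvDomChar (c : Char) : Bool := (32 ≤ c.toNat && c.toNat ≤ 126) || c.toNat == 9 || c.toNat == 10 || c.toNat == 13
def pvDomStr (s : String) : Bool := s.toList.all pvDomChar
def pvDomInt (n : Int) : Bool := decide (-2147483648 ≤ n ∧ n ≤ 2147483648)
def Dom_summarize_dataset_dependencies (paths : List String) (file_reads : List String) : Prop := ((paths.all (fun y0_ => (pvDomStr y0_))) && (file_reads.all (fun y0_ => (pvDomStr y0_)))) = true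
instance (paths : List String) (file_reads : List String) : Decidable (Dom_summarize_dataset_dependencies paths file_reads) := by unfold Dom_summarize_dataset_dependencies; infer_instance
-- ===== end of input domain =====

-- B replaces A's seen-set dedupe + slice-to-8 by a recursive nub that deletes each head's
-- later duplicates by filtering the tail, counting down a budget of 8 (objective: alternative).

-- ===== PORT A =====
-- dedupe_preserve_order: loop over values with a seen set and a result list
def pvDedupePreserveOrder (values : List String) : List String :=
  (values.foldl
    (fun (st : PySem.Set String × List String) value =>
      if PySem.Set.contains st.1 value then st
      else (PySem.Set.add st.1 value, st.2 ++ [value]))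
    (PySem.Set.empty, [])).2

-- compact_items: filter truthy, dedupe, slice [:limit]
def pvCompactItems (items : List String) (limit : Int) : List String :=
  PySem.List.slice (pvDedupePreserveOrder (items.filter (fun item => !(item == "")))) none (some limit)

def summarize_dataset_dependencies (paths : List String) (file_reads : List String) : List String :=
  let candidates := (paths ++ file_reads).foldl
    (fun acc item =>
      let lowered := PySem.Str.lower item
      if PySem.Str.isIn "/kaggle/input" lowered
          || PySem.Str.endswith lowered ".csv" || PySem.Str.endswith lowered ".parquet"
          || PySem.Str.endswith lowered ".json" || PySem.Str.endswith lowered ".hea"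
          || PySem.Str.endswith lowered ".mat" || PySem.Str.endswith lowered ".dat"
          || PySem.Str.endswith lowered ".wfdb"
      then acc ++ [item] else acc) []
  pvCompactItems candidates 8

-- ===== PORT B =====
-- wanted(item): the dataset-path test
def pvWantedB (item : String) : Bool :=
  let low := PySem.Str.lower item
  PySem.Str.isIn "/kaggle/input" low
    || PySem.Str.endswith low ".csv" || PySem.Str.endswith low ".parquet"
    || PySem.Str.endswith low ".json" || PySem.Str.endswith low ".hea"
    || PySem.Str.endswith low ".mat" || PySem.Str.endswith low ".dat"
    || PySem.Str.endswith low ".wfdb"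

-- take_unique(items, k): recursive nub with a countdown budget
def pvTakeUnique : List String → Int → List String
  | [], _ => []
  | head :: rest, k =>
    if k == 0 then []
    else head :: pvTakeUnique (rest.filter (fun x => !(x == head))) (k - 1)
termination_by items _ => items.length
decreasing_by
  simp only [List.length_unattach]
  exact Nat.lt_succ_of_le (le_trans (List.length_filter_le _ _) (by simp))

def summarize_dataset_dependencies_alt (paths : List String) (file_reads : List String) : List String :=
  pvTakeUnique ((paths ++ file_reads).filter (fun p => pvWantedB p)) 8

-- ===== PRECONDITION & SPEC =====
def Spec_summarize_dataset_dependencies (paths : List String) (file_reads : List String) (out : List String) : Prop := out = summarize_dataset_dependencies_alt paths file_reads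
instance (paths : List String) (file_reads : List String) (out : List String) : Decidable (Spec_summarize_dataset_dependencies paths file_reads out) := by unfold Spec_summarize_dataset_dependencies; infer_instance

-- ===== CLAIM (what is proved, stated in full; the proofs are below) =====
def Claim_equal_summarize_dataset_dependencies : Prop := ∀ (paths : List String) (file_reads : List String), Dom_summarize_dataset_dependencies paths file_reads → Spec_summarize_dataset_dependencies paths file_reads (summarize_dataset_dependencies paths file_reads)

-- ===== LEMMAS AND PROOFS =====

-- equation lemmas for the well-founded recursion pvTakeUnique
lemma pvTakeUnique_nil (k : Int) : pvTakeUnique [] k = [] := by rw [pvTakeUnique.eq_def]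

lemma pvTakeUnique_cons (h : String) (r : List String) (k : Int) :
    pvTakeUnique (h :: r) k
      = if k == 0 then [] else h :: pvTakeUnique (r.filter (fun x => !(x == h))) (k - 1) := by
  rw [pvTakeUnique.eq_def]

-- proof-side seen-set dedupe recursion (characterises A's foldl)
def pvD : List String → PySem.Set String → List String
  | [], _ => []
  | x :: r, s => if PySem.Set.contains s x then pvD r s else x :: pvD r (PySem.Set.add s x)

lemma pvA_loop_eq_filter (xs : List String) (acc : List String) :
    xs.foldl (fun acc item => if pvWantedB item then acc ++ [item] else acc) acc
      = acc ++ xs.filter pvWantedB := by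
  induction xs generalizing acc with
  | nil => simp
  | cons x r ih =>
    simp only [List.foldl_cons, List.filter_cons]
    by_cases hc : pvWantedB x = true
    · rw [if_pos hc, ih, hc]
      simp
    · rw [if_neg hc, ih]
      simp [Bool.of_not_eq_true hc]

lemma pvDedupe_foldl_eq (xs : List String) (s : PySem.Set String) (res : List String) :
    (xs.foldl
      (fun (st : PySem.Set String × List String) value =>
        if PySem.Set.contains st.1 value then st
        else (PySem.Set.add st.1 value, st.2 ++ [value])) (s, res)).2
    = res ++ pvD xs s := by
  induction xs generalizing s res with
  | nil => simp [pvD]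
  | cons x r ih =>
    simp only [List.foldl_cons, pvD]
    by_cases h : PySem.Set.contains s x
    · rw [if_pos h, if_pos h, ih]
    · rw [if_neg h, if_neg h, ih]
      simp

lemma pvWantedB_ne_empty {x : String} (h : pvWantedB x = true) : (!(x == "")) = true := by
  rcases eq_or_ne x "" with rfl | hne
  · exact absurd h (by decide)
  · simp [hne]

lemma pvFilter_nonempty (xs : List String) :
    (xs.filter pvWantedB).filter (fun item => !(item == "")) = xs.filter pvWantedB := by
  apply List.filter_eq_self.mpr
  intro a ha
  exact pvWantedB_ne_empty (List.of_mem_filter ha)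

-- key: seen-set dedupe truncated to k = B's budgeted nub on the seen-filtered list
lemma pvD_take_eq (xs : List String) (s : PySem.Set String) (k : Nat) :
    (pvD xs s).take k = pvTakeUnique (xs.filter (fun y => !(PySem.Set.contains s y))) (k : Int) := by
  induction xs generalizing s k with
  | nil => simp [pvD, pvTakeUnique_nil]
  | cons x r ih =>
    simp only [pvD, List.filter_cons]
    by_cases hs : PySem.Set.contains s x
    · rw [if_pos hs]
      simp only [hs, Bool.not_true, Bool.false_eq_true, if_false]
      exact ih s k
    · rw [if_neg hs]
      simp only [Bool.not_eq_true] at hs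
      simp only [hs, Bool.not_false, if_true]
      cases k with
      | zero => simp [pvTakeUnique_cons]
      | succ k' =>
        rw [List.take_succ_cons]
        have hk : ¬ (((k' + 1 : Nat) : Int) == 0) = true := by
          simp only [beq_iff_eq]
          push_cast
          omega
        rw [pvTakeUnique_cons, if_neg hk]
        have hk1 : ((k' + 1 : Nat) : Int) - 1 = (k' : Int) := by push_cast; ring
        have hf : ∀ y : String,
            ((!(y == x)) && !(PySem.Set.contains s y)) = !(PySem.Set.contains (PySem.Set.add s x) y) := by
          intro y
          have hx : x ∉ s := by simpa [PySem.Set.contains] using hs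
          by_cases hy : y = x
          · subst hy
            simp [PySem.Set.add, PySem.Set.contains, hx]
          · simp [PySem.Set.add, PySem.Set.contains, hx, hy]
        rw [hk1, List.filter_filter, List.filter_congr (fun y _ => hf y), ih (PySem.Set.add s x) k']

-- ===== VERDICT (by name: the statement is the Claim_ definition above) =====
theorem summarize_dataset_dependencies_spec : Claim_equal_summarize_dataset_dependencies := by
  intro paths file_reads _
  show summarize_dataset_dependencies paths file_reads = summarize_dataset_dependencies_alt paths file_reads
  have key : ∀ xs : List String,
      pvCompactItems (xs.foldl (fun acc item => if pvWantedB item then acc ++ [item] else acc) []) 8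
        = pvTakeUnique (xs.filter (fun p => pvWantedB p)) 8 := by
    intro xs
    unfold pvCompactItems pvDedupePreserveOrder
    rw [pvA_loop_eq_filter, List.nil_append, pvFilter_nonempty, pvDedupe_foldl_eq, List.nil_append,
        PySem.List.slice_to]
    · rw [show ((8 : Int).toNat) = (8 : Nat) from rfl, pvD_take_eq]
      congr 1
      apply List.filter_eq_self.mpr
      intro a _
      simp [PySem.Set.empty, PySem.Set.contains]
    · norm_num
  exact key (paths ++ file_reads)
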